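-- pv_equiv track=rewrite | github.com/Atsuki-ISG/scouting-letter | server/pipeline/orchestrator.py | _experience_bucket
-- ===== SOURCE A (Python) =====
-- def _experience_bucket(exp_str: str | None) -> str:
--     """Convert experience string to bucket."""
--     if not exp_str:
--         return "不明"
--     try:
--         years = int("".join(c for c in exp_str if c.isdigit()))
--         if years == 0:
--             return "未経験"
--         elif years <= 3:
--             return "1-3年"
--         elif years <= 5:
--             return "4-5年"
--         elif years <= 10:
--             return "6-10年"
--         else:
--             return "11年以上"
--     except (ValueError, TypeError):
--         return "不明"
-- ===== SOURCE B (Python) =====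
-- _LABELS = ["未経験", "1-3年", "4-5年", "6-10年", "11年以上"]
-- _THRESHOLDS = [1, 4, 6, 11]
--
--
-- def _bisect_right(a, x):
--     """Binary search: number of elements of sorted list a that are <= x."""
--     lo, hi = 0, len(a)
--     while lo < hi:
--         mid = (lo + hi) // 2
--         if x < a[mid]:
--             hi = mid
--         else:
--             lo = mid + 1
--     return lo
--
--
-- def _experience_bucket(exp_str: str | None) -> str:
--     """Convert experience string to bucket."""
--     if not exp_str:
--         return "不明"
--     try:
--         years = int("".join(c for c in exp_str if c.isdigit()))
--     except (ValueError, TypeError):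
--         return "不明"
--     return _LABELS[_bisect_right(_THRESHOLDS, years)]
-- ===== Notes on version B (the rewrite author's own statement) =====
-- stated objective: alternative
-- what changed: Replaced the sequential if/elif bucket chain with a sorted threshold table [1,4,6,11] and a hand-written binary search (bisect_right) selecting the label by index; the guard and digit-extraction/int-parse stay as in A.
import Mathlib
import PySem

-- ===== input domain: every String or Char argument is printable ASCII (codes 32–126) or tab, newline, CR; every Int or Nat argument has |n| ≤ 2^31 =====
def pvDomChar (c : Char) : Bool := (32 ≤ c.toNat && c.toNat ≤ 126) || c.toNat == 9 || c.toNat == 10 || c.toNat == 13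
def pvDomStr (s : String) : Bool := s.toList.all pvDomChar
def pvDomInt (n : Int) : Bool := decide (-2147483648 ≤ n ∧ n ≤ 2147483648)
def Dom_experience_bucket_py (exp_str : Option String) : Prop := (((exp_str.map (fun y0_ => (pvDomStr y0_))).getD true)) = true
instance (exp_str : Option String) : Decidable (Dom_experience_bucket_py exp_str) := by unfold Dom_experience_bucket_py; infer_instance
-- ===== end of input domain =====

-- B replaces A's if/elif bucket chain by a sorted threshold table and a binary search
-- (hand-written bisect_right) selecting the label by index; objective: alternative.


-- ===== PORT A =====
def experience_bucket_py (exp_str : Option String) : String :=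
  match exp_str with
  | none => "不明"                                   -- `if not exp_str` (None)
  | some s =>
    if s = "" then "不明"                            -- `if not exp_str` (empty string)
    else
      -- years = int("".join(c for c in exp_str if c.isdigit())); except ValueError -> "不明"
      match PySem.Int.ofChars? (s.toList.filter PySem.Chars.isdigit) with
      | none => "不明"
      | some years =>
        if years = 0 then "未経験"
        else if years ≤ 3 then "1-3年"
        else if years ≤ 5 then "4-5年"
        else if years ≤ 10 then "6-10年"
        else "11年以上"

-- ===== PORT B =====
def pvLabels : List String := ["未経験", "1-3年", "4-5年", "6-10年", "11年以上"]
def pvThresholds : List Int := [1, 4, 6, 11]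

-- _bisect_right's while-loop; lo/hi are nonnegative indices, so Nat with `/` = Python `//`;
-- a[mid] is always in range (lo < hi ≤ len a), ported with getD.
def pvBisectLoop (a : List Int) (x : Int) (lo hi : Nat) : Nat :=
  if lo < hi then
    let mid := (lo + hi) / 2
    if x < a.getD mid 0 then pvBisectLoop a x lo mid
    else pvBisectLoop a x (mid + 1) hi
  else lo
termination_by hi - lo
decreasing_by all_goals omega

def pvBisectRight (a : List Int) (x : Int) : Nat := pvBisectLoop a x 0 a.length

def experience_bucket_py_alt (exp_str : Option String) : String :=
  match exp_str with
  | none => "不明"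
  | some s =>
    if s = "" then "不明"
    else
      match PySem.Int.ofChars? (s.toList.filter PySem.Chars.isdigit) with
      | none => "不明"
      | some years => pvLabels.getD (pvBisectRight pvThresholds years) ""

-- ===== PRECONDITION & SPEC =====
def Spec_experience_bucket_py (exp_str : Option String) (out : String) : Prop := out = experience_bucket_py_alt exp_str
instance (exp_str : Option String) (out : String) : Decidable (Spec_experience_bucket_py exp_str out) := by unfold Spec_experience_bucket_py; infer_instance

-- ===== CLAIM (what is proved, stated in full; the proofs are below) =====
def Claim_equal_experience_bucket_py : Prop := ∀ (exp_str : Option String), Dom_experience_bucket_py exp_str → Spec_experience_bucket_py exp_str (experience_bucket_py exp_str)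

-- ===== LEMMAS AND PROOFS =====

-- int(s) of a digits-only string is never negative.
theorem ofChars?_digits_nonneg (s : List Char) (h : ∀ c ∈ s, PySem.Chars.isdigit c)
    (n : Int) (hn : PySem.Int.ofChars? s = some n) : 0 ≤ n := by
  unfold PySem.Int.ofChars? at hn
  have hsub : ∀ c ∈ (List.dropWhile PySem.Int.isIntSpace
      (List.dropWhile PySem.Int.isIntSpace s).reverse).reverse, PySem.Chars.isdigit c := by
    intro c hc
    apply h
    have h1 := List.dropWhile_sublist (p := PySem.Int.isIntSpace) (l := (List.dropWhile PySem.Int.isIntSpace s).reverse)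
    have h2 := List.dropWhile_sublist (p := PySem.Int.isIntSpace) (l := s)
    rw [List.mem_reverse] at hc
    have := h1.mem hc
    rw [List.mem_reverse] at this
    exact h2.mem this
  simp only [] at hn
  generalize hcs : (List.dropWhile PySem.Int.isIntSpace
      (List.dropWhile PySem.Int.isIntSpace s).reverse).reverse = cs at hn hsub
  split at hn
  · exfalso
    have : PySem.Chars.isdigit '-' := hsub '-' (by simp)
    simp [PySem.Chars.isdigit] at this
  · exfalso
    have : PySem.Chars.isdigit '+' := hsub '+' (by simp)
    simp [PySem.Chars.isdigit] at this
  · simp only [Option.map_eq_some_iff] at hn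
    obtain ⟨m, hm, rfl⟩ := hn
    have key : ∀ (o : Option Nat),
        (o.bind fun a : Nat => some ((a : Int))) = some m → 0 ≤ m := by
      rintro (_ | a) h
      · simp at h
      · simp at h; omega
    exact key _ hm

-- the bucket chain agrees with the table/binary-search lookup for every nonnegative years
theorem bucket_eq (n : Int) (hn : 0 ≤ n) :
    (if n = 0 then "未経験"
     else if n ≤ 3 then "1-3年"
     else if n ≤ 5 then "4-5年"
     else if n ≤ 10 then "6-10年"
     else "11年以上")
    = pvLabels.getD (pvBisectRight pvThresholds n) "" := by
  by_cases h0 : n = 0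
  · rw [if_pos h0]
    simp [pvBisectRight, pvBisectLoop, pvThresholds, pvLabels,
      (show n < 6 by omega), (show n < 4 by omega), (show n < 1 by omega)]
  · by_cases h3 : n ≤ 3
    · have h1 : ¬ n < 1 := by omega
      have h4 : n < 4 := by omega
      simp [pvBisectRight, pvBisectLoop, pvThresholds, pvLabels, h0, h3, h1, h4, (show n < 6 by omega)]
    · by_cases h5 : n ≤ 5
      · simp [pvBisectRight, pvBisectLoop, pvThresholds, pvLabels, h0, h3, h5,
          (show ¬ n < 4 by omega), (show n < 6 by omega)]
      · by_cases h10 : n ≤ 10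
        · simp [pvBisectRight, pvBisectLoop, pvThresholds, pvLabels, h0, h3, h5, h10,
            (show ¬ n < 6 by omega), (show n < 11 by omega)]
        · simp [pvBisectRight, pvBisectLoop, pvThresholds, pvLabels, h0, h3, h5, h10,
            (show ¬ n < 6 by omega), (show ¬ n < 11 by omega)]

-- ===== VERDICT (by name: the statement is the Claim_ definition above) =====
theorem experience_bucket_py_spec : Claim_equal_experience_bucket_py := by
  intro exp_str _
  unfold Spec_experience_bucket_py
  cases exp_str with
  | none => rfl
  | some s =>
    simp only [experience_bucket_py, experience_bucket_py_alt]
    by_cases hs : s = ""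
    · simp [hs]
    · simp only [hs, ite_false]
      cases hp : PySem.Int.ofChars? (s.toList.filter PySem.Chars.isdigit) with
      | none => rfl
      | some n =>
        have hdig : ∀ c ∈ s.toList.filter PySem.Chars.isdigit, PySem.Chars.isdigit c := by
          intro c hc; exact (List.mem_filter.mp hc).2
        exact bucket_eq n (ofChars?_digits_nonneg _ hdig n hp)
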